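-- pv_equiv track=rewrite | github.com/syth0le/interview | Python/Interview Examples/Yandex/3_part/practice/task_3.py | solution
-- ===== SOURCE A (Python) =====
-- def solution(num1: list[int], num2: list[int]):
--     N = len(num1)
--     hashmap = {}
--     res = []
--     for i in range(1, N + 1):
--         curr = num1[i-1]
--         if curr not in hashmap:
--             hashmap[curr] = 1
--         else:
--             hashmap[curr] += 1
--         temp = 0
--         for item in num2[:i]:
--             if item in hashmap:
--                 temp += 1
--         res.append(temp)
--     return res
-- ===== SOURCE B (Python) =====
-- def solution(num1: list[int], num2: list[int]):
--     # One pass: incremental seen-set + pending counts of not-yet-seen num2-prefix values.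
--     seen = set()
--     pending = {}  # value -> occurrences in the scanned num2-prefix while value not yet in seen
--     count = 0
--     res = []
--     for i, x in enumerate(num1):
--         if x not in seen:
--             seen.add(x)
--             count += pending.get(x, 0)
--         if i < len(num2):
--             y = num2[i]
--             if y in seen:
--                 count += 1
--             else:
--                 pending[y] = pending.get(y, 0) + 1
--         res.append(count)
--     return res
-- ===== Notes on version B (the rewrite author's own statement) =====
-- stated objective: faster
-- what changed: Replaced the per-step rescan of the num2-prefix with a single pass that maintains an incremental seen-set, a pending-occurrence counter for not-yet-seen num2 values, and a running match count.
import Mathlib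
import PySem

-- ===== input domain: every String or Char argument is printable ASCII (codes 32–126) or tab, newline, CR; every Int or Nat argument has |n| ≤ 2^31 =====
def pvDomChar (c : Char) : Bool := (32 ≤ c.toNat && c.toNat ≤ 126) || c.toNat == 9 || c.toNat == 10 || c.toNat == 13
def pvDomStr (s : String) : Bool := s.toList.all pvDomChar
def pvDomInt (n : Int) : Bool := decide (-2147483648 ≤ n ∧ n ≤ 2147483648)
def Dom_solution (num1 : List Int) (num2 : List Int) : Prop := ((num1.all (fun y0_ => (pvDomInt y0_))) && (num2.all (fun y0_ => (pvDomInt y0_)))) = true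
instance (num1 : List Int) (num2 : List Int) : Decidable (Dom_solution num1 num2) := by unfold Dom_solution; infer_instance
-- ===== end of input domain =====

-- B replaces A's per-step rescan of num2[:i] by an incremental seen-set / pending-counter single pass.

-- ===== PORT A =====
-- loop body of A's 'for i in range(1, N+1)' loop; the index i-1 is always in range, so .getD 0 never yields the default
def solutionStep (num1 : List Int) (num2 : List Int) (st : PySem.Dict Int Int × List Int) (i : Int) :
    PySem.Dict Int Int × List Int :=
  let curr := (PySem.List.pyGet? num1 (i - 1)).getD 0
  let hashmap := if st.1.contains curr = false then st.1.insert curr 1 else st.1.modify curr 0 (· + 1)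
  let temp := (PySem.List.slice num2 none (some i)).foldl
    (fun t item => if hashmap.contains item then t + 1 else t) 0
  (hashmap, st.2 ++ [temp])

def solution (num1 : List Int) (num2 : List Int) : List Int :=
  let N : Int := (num1.length : Int)
  ((PySem.List.pyRange 1 (N + 1) 1).foldl (solutionStep num1 num2) (PySem.Dict.empty, [])).2

-- ===== PORT B =====
-- loop body of B's 'for i, x in enumerate(num1)' loop; state = (seen, pending, count, res)
def solutionAltStep (num2 : List Int) (st : PySem.Set Int × PySem.Dict Int Int × Int × List Int)
    (p : Int × Int) : PySem.Set Int × PySem.Dict Int Int × Int × List Int :=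
  let seen := st.1
  let pending := st.2.1
  let count := st.2.2.1
  let res := st.2.2.2
  let i := p.1
  let x := p.2
  let seen' := if PySem.Set.contains seen x = false then PySem.Set.add seen x else seen
  let count' := if PySem.Set.contains seen x = false then count + pending.getD x 0 else count
  let pc :=
    if i < (num2.length : Int) then
      let y := (PySem.List.pyGet? num2 i).getD 0
      if PySem.Set.contains seen' y then (pending, count' + 1)
      else (pending.insert y (pending.getD y 0 + 1), count')
    else (pending, count')
  (seen', pc.1, pc.2, res ++ [pc.2])

def solution_alt (num1 : List Int) (num2 : List Int) : List Int :=
  ((PySem.List.enumerate num1 0).foldl (solutionAltStep num2)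
    (PySem.Set.empty, PySem.Dict.empty, 0, [])).2.2.2

-- ===== PRECONDITION & SPEC =====
def Spec_solution (num1 : List Int) (num2 : List Int) (out : List Int) : Prop := out = solution_alt num1 num2
instance (num1 : List Int) (num2 : List Int) (out : List Int) : Decidable (Spec_solution num1 num2 out) := by unfold Spec_solution; infer_instance

-- ===== CLAIM (what is proved, stated in full; the proofs are below) =====
def Claim_equal_solution : Prop := ∀ (num1 : List Int) (num2 : List Int), Dom_solution num1 num2 → Spec_solution num1 num2 (solution num1 num2)

-- ===== LEMMAS AND PROOFS =====

-- the common specification: after m steps the running count is pvAcc m; the m-th result entry is pvCnt m = pvAcc (m+1)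
def pvAcc (num1 : List Int) (num2 : List Int) (m : Nat) : Int :=
  ((num2.take m).countP (fun y => decide (y ∈ num1.take m)) : Int)

def pvCnt (num1 : List Int) (num2 : List Int) (k : Nat) : Int := pvAcc num1 num2 (k + 1)

theorem pvCountP_append (l s : List Int) (x : Int) (hx : x ∉ s) :
    l.countP (fun y => decide (y ∈ s ++ [x])) = l.countP (fun y => decide (y ∈ s)) + l.count x := by
  induction l with
  | nil => simp
  | cons a t ih =>
    simp only [List.countP_cons, List.count_cons, ih]
    by_cases has : a ∈ s <;> by_cases hax : a = x <;>
      simp [has, hax, hx] <;> omega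

theorem pvTakeSucc (l : List Int) (m : Nat) (hm : m < l.length) :
    l.take (m + 1) = l.take m ++ [l[m]] := by
  rw [List.take_add_one]
  simp [List.getElem?_eq_getElem hm]

theorem solution_loop (num1 num2 : List Int) (m : Nat) (hm : m ≤ num1.length) :
    ∃ d : PySem.Dict Int Int,
      (PySem.List.pyRange 1 ((m : Int) + 1) 1).foldl (solutionStep num1 num2)
          (PySem.Dict.empty, [])
        = (d, (List.range m).map (pvCnt num1 num2))
      ∧ ∀ y : Int, d.contains y = decide (y ∈ num1.take m) := by
  induction m with
  | zero =>
    refine ⟨PySem.Dict.empty, ?_, by simp [PySem.Dict.contains_empty]⟩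
    rw [PySem.List.pyRange_one]
    simp
  | succ m ih =>
    obtain ⟨d, hfold, hcont⟩ := ih (Nat.le_of_succ_le hm)
    have hmlt : m < num1.length := Nat.lt_of_succ_le hm
    have htake : num1.take (m + 1) = num1.take m ++ [num1[m]] := pvTakeSucc _ _ hmlt
    have hmem : ∀ y : Int, y ∈ num1.take (m + 1) ↔ (y ∈ num1.take m ∨ y = num1[m]) := by
      intro y
      rw [htake, List.mem_append, List.mem_singleton]
    have hrange : PySem.List.pyRange 1 (((m + 1 : Nat) : Int) + 1) 1
        = PySem.List.pyRange 1 ((m : Int) + 1) 1 ++ [(m : Int) + 1] := by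
      have h1 : (((m + 1 : Nat) : Int) + 1) = ((m : Int) + 1) + 1 := by push_cast; ring
      rw [h1, PySem.List.pyRange_one_succ_right (by omega)]
    have hcurr : (PySem.List.pyGet? num1 ((m : Int) + 1 - 1)).getD 0 = num1[m] := by
      have h1 : (m : Int) + 1 - 1 = (m : Int) := by ring
      rw [h1, PySem.List.pyGet?_natCast]
      simp [List.getElem?_eq_getElem hmlt]
    have hcont' : ∀ y : Int,
        (if d.contains num1[m] = false then d.insert num1[m] 1 else d.modify num1[m] 0 (· + 1)).contains y
          = decide (y ∈ num1.take (m + 1)) := by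
      intro y
      split_ifs with h
      · rw [PySem.Dict.contains_insert, hcont]
        by_cases hy : y = num1[m] <;> by_cases hym : y ∈ num1.take m <;> simp [hy, hym, hmem]
      · have hxm : num1[m] ∈ num1.take m := by
          rw [Bool.not_eq_false] at h
          have h2 := hcont num1[m]
          rw [h] at h2
          simpa using h2.symm
        rw [PySem.Dict.contains_modify, hcont]
        by_cases hy : y = num1[m] <;> by_cases hym : y ∈ num1.take m <;> simp [hy, hym, hmem, hxm]
    refine ⟨_, ?_, hcont'⟩
    rw [hrange, List.foldl_append, hfold]
    simp only [List.foldl_cons, List.foldl_nil, solutionStep, hcurr]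
    have hcast : (m : Int) + 1 = ((m + 1 : Nat) : Int) := by push_cast; ring
    rw [hcast, PySem.List.slice_to_natCast, PySem.List.foldl_if_add_one]
    rw [List.countP_congr (fun x _ => by rw [hcont' x])]
    rw [List.range_succ, List.map_append]
    simp [pvCnt, pvAcc]

theorem pvSetContains (s : PySem.Set Int) (x : Int) :
    PySem.Set.contains s x = decide (x ∈ s) := by
  simp [PySem.Set.contains]

theorem pvAltStepTail (num1 num2 : List Int) (m : Nat) (hmlt : m < num1.length)
    {seen1 : PySem.Set Int} {count1 : Int} {pending : PySem.Dict Int Int}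
    (hseen1 : ∀ y : Int, y ∈ seen1 ↔ y ∈ num1.take (m + 1))
    (hcnt1 : count1 = ((num2.take m).countP (fun y => decide (y ∈ num1.take (m + 1))) : Int))
    (hpend : ∀ z : Int, z ∉ num1.take m → pending.getD z 0 = ((num2.take m).count z : Int)) :
    ∃ (seen' : PySem.Set Int) (pending' : PySem.Dict Int Int),
      (seen1,
        (if (m : Int) < (num2.length : Int) then
            if PySem.Set.contains seen1 ((PySem.List.pyGet? num2 (m : Int)).getD 0) then
              (pending, count1 + 1)
            else
              (pending.insert ((PySem.List.pyGet? num2 (m : Int)).getD 0)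
                (pending.getD ((PySem.List.pyGet? num2 (m : Int)).getD 0) 0 + 1), count1)
          else (pending, count1)).1,
        (if (m : Int) < (num2.length : Int) then
            if PySem.Set.contains seen1 ((PySem.List.pyGet? num2 (m : Int)).getD 0) then
              (pending, count1 + 1)
            else
              (pending.insert ((PySem.List.pyGet? num2 (m : Int)).getD 0)
                (pending.getD ((PySem.List.pyGet? num2 (m : Int)).getD 0) 0 + 1), count1)
          else (pending, count1)).2,
        (List.range m).map (pvCnt num1 num2) ++
          [(if (m : Int) < (num2.length : Int) then
              if PySem.Set.contains seen1 ((PySem.List.pyGet? num2 (m : Int)).getD 0) then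
                (pending, count1 + 1)
              else
                (pending.insert ((PySem.List.pyGet? num2 (m : Int)).getD 0)
                  (pending.getD ((PySem.List.pyGet? num2 (m : Int)).getD 0) 0 + 1), count1)
            else (pending, count1)).2])
        = (seen', pending', pvAcc num1 num2 (m + 1), (List.range (m + 1)).map (pvCnt num1 num2))
      ∧ (∀ y : Int, y ∈ seen' ↔ y ∈ num1.take m ++ [num1[m]])
      ∧ (∀ z : Int, z ∉ num1.take m ++ [num1[m]] →
          pending'.getD z 0 = ((num2.take (m + 1)).count z : Int)) := by
  have htake1 : num1.take (m + 1) = num1.take m ++ [num1[m]] := pvTakeSucc _ _ hmlt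
  have hseen1' : ∀ y : Int, y ∈ seen1 ↔ y ∈ num1.take m ++ [num1[m]] := by
    intro y
    rw [← htake1]
    exact hseen1 y
  by_cases hl : m < num2.length
  · have hli : ((m : Int) < (num2.length : Int)) := by exact_mod_cast hl
    rw [if_pos hli]
    have hy0 : (PySem.List.pyGet? num2 (m : Int)).getD 0 = num2[m] := by
      rw [PySem.List.pyGet?_natCast]
      simp [List.getElem?_eq_getElem hl]
    rw [hy0]
    have htake2 : num2.take (m + 1) = num2.take m ++ [num2[m]] := pvTakeSucc _ _ hl
    have hcy : PySem.Set.contains seen1 num2[m] = decide (num2[m] ∈ num1.take (m + 1)) := by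
      rw [pvSetContains]
      exact decide_eq_decide.mpr (hseen1 _)
    rw [hcy]
    by_cases hy : num2[m] ∈ num1.take (m + 1)
    · rw [if_pos (by simp [hy])]
      refine ⟨seen1, pending, ?_, hseen1', ?_⟩
      · have hacc : count1 + 1 = pvAcc num1 num2 (m + 1) := by
          rw [hcnt1, pvAcc, htake2, List.countP_append]
          simp [hy]
        rw [hacc, List.range_succ, List.map_append]
        simp [pvCnt]
      · intro z hz
        rw [← htake1] at hz
        have hz' : z ∉ num1.take m := fun h => hz (htake1 ▸ List.mem_append_left _ h)
        have hzy : num2[m] ≠ z := fun h => hz (h ▸ hy)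
        rw [hpend z hz', htake2, List.count_append, List.count_singleton]
        simp [hzy]
    · rw [if_neg (by simp [hy])]
      refine ⟨seen1, pending.insert num2[m] (pending.getD num2[m] 0 + 1), ?_, hseen1', ?_⟩
      · have hacc : count1 = pvAcc num1 num2 (m + 1) := by
          rw [hcnt1, pvAcc, htake2, List.countP_append]
          simp [hy]
        rw [hacc, List.range_succ, List.map_append]
        simp [pvCnt]
      · intro z hz
        rw [← htake1] at hz
        have hz' : z ∉ num1.take m := fun h => hz (htake1 ▸ List.mem_append_left _ h)
        rw [PySem.Dict.getD_insert, htake2, List.count_append, List.count_singleton]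
        by_cases hzy : z = num2[m]
        · rw [if_pos hzy, hzy, hpend _ (hzy ▸ hz')]
          simp
        · rw [if_neg hzy, hpend _ hz']
          have hzy' : ¬ (num2[m] = z) := fun h => hzy h.symm
          simp [hzy']
  · have hli : ¬ ((m : Int) < (num2.length : Int)) := by exact_mod_cast hl
    rw [if_neg hli]
    have hle : num2.length ≤ m := Nat.le_of_not_lt hl
    have h2 : num2.take (m + 1) = num2.take m := by
      rw [List.take_of_length_le hle, List.take_of_length_le (Nat.le_succ_of_le hle)]
    refine ⟨seen1, pending, ?_, hseen1', ?_⟩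
    · have hacc : count1 = pvAcc num1 num2 (m + 1) := by rw [hcnt1, pvAcc, h2]
      rw [hacc, List.range_succ, List.map_append]
      simp [pvCnt]
    · intro z hz
      rw [← htake1] at hz
      have hz' : z ∉ num1.take m := fun h => hz (htake1 ▸ List.mem_append_left _ h)
      rw [h2]
      exact hpend z hz'

theorem solution_alt_loop (num1 num2 : List Int) (m : Nat) (hm : m ≤ num1.length) :
    ∃ (seen : PySem.Set Int) (pending : PySem.Dict Int Int),
      (PySem.List.enumerate (num1.take m) 0).foldl (solutionAltStep num2)
          (PySem.Set.empty, PySem.Dict.empty, 0, [])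
        = (seen, pending, pvAcc num1 num2 m, (List.range m).map (pvCnt num1 num2))
      ∧ (∀ y : Int, y ∈ seen ↔ y ∈ num1.take m)
      ∧ (∀ z : Int, z ∉ num1.take m → pending.getD z 0 = ((num2.take m).count z : Int)) := by
  induction m with
  | zero =>
    refine ⟨PySem.Set.empty, PySem.Dict.empty, by simp [pvAcc], ?_, ?_⟩
    · intro y
      simp [PySem.Set.empty]
    · intro z _
      simp [PySem.Dict.getD_empty]
  | succ m ih =>
    obtain ⟨seen, pending, hfold, hseen, hpend⟩ := ih (Nat.le_of_succ_le hm)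
    have hmlt : m < num1.length := Nat.lt_of_succ_le hm
    have htake1 : num1.take (m + 1) = num1.take m ++ [num1[m]] := pvTakeSucc _ _ hmlt
    have hlen_take : (num1.take m).length = m := by simp [Nat.le_of_lt hmlt]
    have hmem1 : ∀ y : Int, y ∈ num1.take (m + 1) ↔ (y ∈ num1.take m ∨ y = num1[m]) := by
      intro y
      rw [htake1, List.mem_append, List.mem_singleton]
    have hcx : PySem.Set.contains seen num1[m] = decide (num1[m] ∈ num1.take m) := by
      rw [pvSetContains]
      exact decide_eq_decide.mpr (hseen _)
    rw [htake1, PySem.List.enumerate_append, List.foldl_append, hfold, hlen_take]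
    have hone : PySem.List.enumerate [num1[m]] (0 + (m : Int)) = [((m : Int), num1[m])] := by
      simp [PySem.List.enumerate_cons, PySem.List.enumerate_nil]
    rw [hone]
    simp only [List.foldl_cons, List.foldl_nil, solutionAltStep, hcx]
    by_cases hx : num1[m] ∈ num1.take m
    · have hstep1 : ∀ y : Int,
          y ∈ (if (decide (num1[m] ∈ num1.take m)) = false then PySem.Set.add seen num1[m] else seen)
            ↔ y ∈ num1.take (m + 1) := by
        intro y
        rw [if_neg (by simp [hx]), hmem1]
        constructor
        · intro h
          exact Or.inl ((hseen y).mp h)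
        · rintro (h | rfl)
          · exact (hseen y).mpr h
          · exact (hseen _).mpr hx
      have hcnt1 : (if (decide (num1[m] ∈ num1.take m)) = false then
            pvAcc num1 num2 m + pending.getD num1[m] 0 else pvAcc num1 num2 m)
          = ((num2.take m).countP (fun y => decide (y ∈ num1.take (m + 1))) : Int) := by
        rw [if_neg (by simp [hx]), pvAcc]
        refine congrArg Nat.cast (List.countP_congr ?_)
        intro a _
        simp only [decide_eq_true_eq, hmem1 a]
        constructor
        · exact Or.inl
        · rintro (h | rfl)
          · exact h
          · exact hx
      exact pvAltStepTail num1 num2 m hmlt hstep1 hcnt1 hpend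
    · have hstep1 : ∀ y : Int,
          y ∈ (if (decide (num1[m] ∈ num1.take m)) = false then PySem.Set.add seen num1[m] else seen)
            ↔ y ∈ num1.take (m + 1) := by
        intro y
        rw [if_pos (by simp [hx]), hmem1, PySem.Set.mem_add]
        constructor
        · rintro (h | rfl)
          · exact Or.inl ((hseen y).mp h)
          · exact Or.inr rfl
        · rintro (h | rfl)
          · exact Or.inl ((hseen y).mpr h)
          · exact Or.inr rfl
      have hcnt1 : (if (decide (num1[m] ∈ num1.take m)) = false then
            pvAcc num1 num2 m + pending.getD num1[m] 0 else pvAcc num1 num2 m)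
          = ((num2.take m).countP (fun y => decide (y ∈ num1.take (m + 1))) : Int) := by
        rw [if_pos (by simp [hx]), hpend _ hx, pvAcc, htake1,
          pvCountP_append (num2.take m) (num1.take m) num1[m] hx]
        push_cast
        ring
      exact pvAltStepTail num1 num2 m hmlt hstep1 hcnt1 hpend

theorem solution_eq_spec (num1 num2 : List Int) :
    solution num1 num2 = (List.range num1.length).map (pvCnt num1 num2) := by
  obtain ⟨d, hfold, -⟩ := solution_loop num1 num2 num1.length le_rfl
  simp only [solution]
  rw [hfold]

theorem solution_alt_eq_spec (num1 num2 : List Int) :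
    solution_alt num1 num2 = (List.range num1.length).map (pvCnt num1 num2) := by
  obtain ⟨seen, pending, hfold, -, -⟩ := solution_alt_loop num1 num2 num1.length le_rfl
  rw [List.take_length] at hfold
  simp only [solution_alt]
  rw [hfold]

-- ===== VERDICT (by name: the statement is the Claim_ definition above) =====
theorem solution_spec : Claim_equal_solution := by
  intro num1 num2 _
  unfold Spec_solution
  rw [solution_eq_spec, solution_alt_eq_spec]
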